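-- pv_equiv track=rewrite | github.com/dretyr/adventofai | 2023/5/Code_failed/main_part2_try4.py | convert_range
-- ===== SOURCE A (Python) =====
-- def convert_range(start, length, ranges, memo):
--     # If the range is already computed, return the result
--     if (start, length) in memo:
--         return memo[(start, length)]
--
--     converted_range = []
--     for i in range(start, start + length):
--         for src_start, src_end, dest_start in ranges:
--             if src_start <= i < src_end:
--                 converted_range.append(i - src_start + dest_start)
--                 break
--         else:
--             converted_range.append(i)
--
--     memo[(start, length)] = converted_range
--     return converted_range
-- ===== SOURCE B (Python) =====
-- def convert_range(start, length, ranges, memo):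
--     if (start, length) in memo:
--         return memo[(start, length)]
--
--     end = start + length
--     out = []
--     i = start
--     while i < end:
--         # first range containing i (same first-match rule as the spec)
--         hit = None
--         for s, e, d in ranges:
--             if s <= i < e:
--                 hit = (s, d)
--                 break
--         # next point where any range boundary could change the match
--         j = end
--         for s, e, _ in ranges:
--             if i < s < j:
--                 j = s
--             if i < e < j:
--                 j = e
--         # the whole block [i, j) maps through the same rule
--         if hit is None:
--             out.extend(range(i, j))
--         else:
--             s, d = hit
--             out.extend(range(i - s + d, j - s + d))
--         i = j
--
--     memo[(start, length)] = out
--     return out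
-- ===== Notes on version B (the rewrite author's own statement) =====
-- stated objective: faster
-- what changed: Instead of scanning all ranges for every single integer of the block, B advances block-wise: it finds the first matching range at the block start, computes the next range boundary, and emits the whole contiguous run at once with extend(range(...)).
import Mathlib
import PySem

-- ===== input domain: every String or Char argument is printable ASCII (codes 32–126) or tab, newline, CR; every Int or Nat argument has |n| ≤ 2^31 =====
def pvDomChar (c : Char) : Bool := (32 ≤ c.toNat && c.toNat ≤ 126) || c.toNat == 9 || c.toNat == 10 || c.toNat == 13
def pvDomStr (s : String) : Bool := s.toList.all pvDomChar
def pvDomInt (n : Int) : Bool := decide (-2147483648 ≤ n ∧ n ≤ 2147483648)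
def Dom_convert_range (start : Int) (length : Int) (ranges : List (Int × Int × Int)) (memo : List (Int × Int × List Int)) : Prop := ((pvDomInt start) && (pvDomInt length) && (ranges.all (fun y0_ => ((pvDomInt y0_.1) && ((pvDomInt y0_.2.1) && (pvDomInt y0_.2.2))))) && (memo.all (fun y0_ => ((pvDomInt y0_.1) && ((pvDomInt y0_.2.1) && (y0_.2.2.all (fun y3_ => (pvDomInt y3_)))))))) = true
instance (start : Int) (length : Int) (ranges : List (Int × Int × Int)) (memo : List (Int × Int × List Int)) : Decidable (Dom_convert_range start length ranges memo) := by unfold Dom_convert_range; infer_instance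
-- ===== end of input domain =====

-- B replaces A's per-integer scan of all ranges with a block-wise sweep (find the match once,
-- jump to the next range boundary, emit the whole run): faster when the range is long.
-- A mutates `memo` in place (and B's Python does the same); the equivalence proved here is
-- about the RETURN value only.

-- ===== PORT A =====

-- `(start, length) in memo` / `memo[(start, length)]`: dict lookup = first entry whose key
-- (the first two components) equals (start, length); exact for a Python dict (keys unique).
def memoLookup (start : Int) (length : Int) : List (Int × Int × List Int) → Option (List Int)
  | [] => none
  | (a, b, v) :: rest =>
      if a = start ∧ b = length then some v else memoLookup start length rest

-- inner `for … break / else` loop of A: first range containing i, else i itself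
def aFirst (i : Int) : List (Int × Int × Int) → Int
  | [] => i
  | (s, e, d) :: rest => if s ≤ i ∧ i < e then i - s + d else aFirst i rest

def convert_range (start : Int) (length : Int) (ranges : List (Int × Int × Int)) (memo : List (Int × Int × List Int)) : List Int :=
  match memoLookup start length memo with
  | some v => v
  | none =>
      (PySem.List.pyRange start (start + length) 1).foldl
        (fun acc i => acc ++ [aFirst i ranges]) []

-- ===== PORT B =====

-- B's first inner loop: first range containing i, returning its (src_start, dest_start)
def bHit (i : Int) : List (Int × Int × Int) → Option (Int × Int)
  | [] => none
  | (s, e, d) :: rest => if s ≤ i ∧ i < e then some (s, d) else bHit i rest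

-- B's second inner loop: smallest boundary in (i, j)
def bNext (i : Int) : List (Int × Int × Int) → Int → Int
  | [], j => j
  | (s, e, _) :: rest, j =>
      bNext i rest
        (if i < e ∧ e < (if i < s ∧ s < j then s else j) then e
         else (if i < s ∧ s < j then s else j))

theorem bNext_gt (i : Int) : ∀ (rs : List (Int × Int × Int)) (j : Int), i < j → i < bNext i rs j := by
  intro rs
  induction rs with
  | nil => intro j h; exact h
  | cons r rest ih =>
      intro j h
      obtain ⟨s, e, d⟩ := r
      simp only [bNext]
      exact ih _ (by split_ifs <;> omega)

-- the block emitted for [i, j): `out.extend(range(...))`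
def bBlock (i j : Int) (ranges : List (Int × Int × Int)) : List Int :=
  match bHit i ranges with
  | none => PySem.List.pyRange i j 1
  | some (s, d) => PySem.List.pyRange (i - s + d) (j - s + d) 1

-- B's while loop, driven by the remaining distance (end - i)
def bLoop (ranges : List (Int × Int × Int)) (endv : Int) (i : Int) : List Int :=
  if h : i < endv then
    bBlock i (bNext i ranges endv) ranges ++ bLoop ranges endv (bNext i ranges endv)
  else []
termination_by (endv - i).toNat
decreasing_by
  have hj : i < bNext i ranges endv := bNext_gt i ranges endv h
  omega

def convert_range_alt (start : Int) (length : Int) (ranges : List (Int × Int × Int)) (memo : List (Int × Int × List Int)) : List Int :=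
  match memoLookup start length memo with
  | some v => v
  | none => bLoop ranges (start + length) start

-- ===== PRECONDITION & SPEC =====
def Spec_convert_range (start : Int) (length : Int) (ranges : List (Int × Int × Int)) (memo : List (Int × Int × List Int)) (out : List Int) : Prop := out = convert_range_alt start length ranges memo
instance (start : Int) (length : Int) (ranges : List (Int × Int × Int)) (memo : List (Int × Int × List Int)) (out : List Int) : Decidable (Spec_convert_range start length ranges memo out) := by unfold Spec_convert_range; infer_instance

-- ===== CLAIM (what is proved, stated in full; the proofs are below) =====
def Claim_equal_convert_range : Prop := ∀ (start : Int) (length : Int) (ranges : List (Int × Int × Int)) (memo : List (Int × Int × List Int)), Dom_convert_range start length ranges memo → Spec_convert_range start length ranges memo (convert_range start length ranges memo)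

-- ===== LEMMAS AND PROOFS =====

theorem bNext_le (i : Int) : ∀ (rs : List (Int × Int × Int)) (j : Int), bNext i rs j ≤ j := by
  intro rs
  induction rs with
  | nil => intro j; exact le_refl j
  | cons r rest ih =>
      intro j
      obtain ⟨s, e, d⟩ := r
      simp only [bNext]
      split_ifs <;> exact le_trans (ih _) (by omega)


-- A's append-fold is a map
theorem foldl_append_map (f : Int → Int) :
    ∀ (l : List Int) (acc : List Int),
      l.foldl (fun a i => a ++ [f i]) acc = acc ++ l.map f := by
  intro l
  induction l with
  | nil => intro acc; simp
  | cons x xs ih => intro acc; simp [ih]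

-- no boundary of any range lies strictly inside (i, bNext i rs j0)
theorem bNext_nb (i : Int) :
    ∀ (rs : List (Int × Int × Int)) (j0 : Int),
      ∀ r ∈ rs, ¬ (i < r.1 ∧ r.1 < bNext i rs j0) ∧ ¬ (i < r.2.1 ∧ r.2.1 < bNext i rs j0) := by
  intro rs
  induction rs with
  | nil => intro j0 r hr; cases hr
  | cons q rest ih =>
      intro j0 r hr
      obtain ⟨s, e, d⟩ := q
      simp only [bNext]
      rcases List.mem_cons.mp hr with hr | hr
      · subst hr
        constructor
        · rintro ⟨h1, h2⟩
          have h1' : i < s := h1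
          have h2' : s < bNext i rest
              (if i < e ∧ e < (if i < s ∧ s < j0 then s else j0) then e
               else (if i < s ∧ s < j0 then s else j0)) := h2
          have hle := bNext_le i rest
            (if i < e ∧ e < (if i < s ∧ s < j0 then s else j0) then e
             else (if i < s ∧ s < j0 then s else j0))
          split_ifs at hle h2' <;> omega
        · rintro ⟨h1, h2⟩
          have h1' : i < e := h1
          have h2' : e < bNext i rest
              (if i < e ∧ e < (if i < s ∧ s < j0 then s else j0) then e
               else (if i < s ∧ s < j0 then s else j0)) := h2
          have hle := bNext_le i rest
            (if i < e ∧ e < (if i < s ∧ s < j0 then s else j0) then e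
             else (if i < s ∧ s < j0 then s else j0))
          split_ifs at hle h2' <;> omega
      · exact ih _ r hr

-- within a boundary-free block, A's per-element rule equals B's block rule
theorem first_eq_hit (ranges : List (Int × Int × Int)) (i j x : Int)
    (hnb : ∀ r ∈ ranges, ¬ (i < r.1 ∧ r.1 < j) ∧ ¬ (i < r.2.1 ∧ r.2.1 < j))
    (hix : i ≤ x) (hxj : x < j) :
    aFirst x ranges = (match bHit i ranges with
                       | none => x
                       | some (s, d) => x - s + d) := by
  induction ranges with
  | nil => simp [aFirst, bHit]
  | cons r rest ih =>
      obtain ⟨s, e, d⟩ := r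
      have hb := hnb (s, e, d) (List.mem_cons_self ..)
      simp only at hb
      have hiff : (s ≤ x ∧ x < e) ↔ (s ≤ i ∧ i < e) := by
        constructor <;> intro h <;> omega
      simp only [aFirst, bHit]
      by_cases hc : s ≤ i ∧ i < e
      · rw [if_pos (hiff.mpr hc), if_pos hc]
      · rw [if_neg (fun h => hc (hiff.mp h)), if_neg hc]
        exact ih (fun r hr => hnb r (List.mem_cons_of_mem _ hr))

theorem map_add_pyRange (a b c : Int) :
    (PySem.List.pyRange a b 1).map (fun x => x + c) = PySem.List.pyRange (a + c) (b + c) 1 := by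
  by_cases h : a < b
  · generalize hn : (b - a).toNat = n
    induction n generalizing a with
    | zero => omega
    | succ n ihn =>
        rw [PySem.List.pyRange_one_cons h, PySem.List.pyRange_one_cons (by omega : a + c < b + c)]
        simp only [List.map_cons]
        by_cases h' : a + 1 < b
        · rw [ihn (a + 1) h' (by omega)]
          ring_nf
        · rw [PySem.List.pyRange_one_eq_nil (by omega), PySem.List.pyRange_one_eq_nil (by omega)]
          simp
  · rw [PySem.List.pyRange_one_eq_nil (by omega), PySem.List.pyRange_one_eq_nil (by omega)]
    simp

-- the heart: B's block sweep produces exactly A's per-element map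
theorem bLoop_eq_map (ranges : List (Int × Int × Int)) (endv : Int) :
    ∀ (i : Int), bLoop ranges endv i = (PySem.List.pyRange i endv 1).map (fun x => aFirst x ranges) := by
  intro i
  by_cases h : i < endv
  · generalize hn : (endv - i).toNat = n
    induction n using Nat.strong_induction_on generalizing i with
    | _ n ihn =>
        unfold bLoop
        rw [dif_pos h]
        set j := bNext i ranges endv with hj
        have hij : i < j := bNext_gt i ranges endv h
        have hje : j ≤ endv := bNext_le i ranges endv
        have hnb := bNext_nb i ranges endv
        rw [PySem.List.pyRange_one_append i j endv (by omega) hje, List.map_append]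
        congr 1
        · -- the block equals the mapped range
          unfold bBlock
          have hmap : ∀ x ∈ PySem.List.pyRange i j 1,
              aFirst x ranges = (match bHit i ranges with
                                 | none => x
                                 | some (s, d) => x - s + d) := by
            intro x hx
            rw [PySem.List.mem_pyRange_one] at hx
            exact first_eq_hit ranges i j x (by simpa [hj] using hnb) hx.1 hx.2
          cases hh : bHit i ranges with
          | none =>
              simp only [hh] at hmap ⊢
              exact ((List.map_congr_left hmap).trans (by simp)).symm
          | some sd =>
              obtain ⟨s, d⟩ := sd
              simp only [hh] at hmap ⊢
              rw [List.map_congr_left hmap]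
              rw [show i - s + d = i + (d - s) by ring, show j - s + d = j + (d - s) by ring,
                 ← map_add_pyRange i j (d - s)]
              exact List.map_congr_left (fun x _ => by ring)
        · -- the tail
          by_cases h2 : j < endv
          · exact ihn (endv - j).toNat (by omega) j h2 rfl
          · unfold bLoop
            rw [dif_neg (by omega), PySem.List.pyRange_one_eq_nil (by omega)]
            simp
  · unfold bLoop
    rw [dif_neg h, PySem.List.pyRange_one_eq_nil (by omega)]
    simp

-- ===== VERDICT (by name: the statement is the Claim_ definition above) =====
theorem convert_range_spec : Claim_equal_convert_range := by
  intro start length ranges memo _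
  unfold Spec_convert_range convert_range convert_range_alt
  cases memoLookup start length memo with
  | some v => rfl
  | none =>
      simp only
      rw [foldl_append_map, bLoop_eq_map]
      simp
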